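-- pv_equiv track=rewrite | github.com/genggng/leetcode | 341-2.py | maxDivScore
-- ===== SOURCE A (Python) =====
-- from typing import List,Optional
--
-- def maxDivScore(nums: List[int], divisors: List[int]) -> int:
--     score = []
--     for d in divisors:
--         t = 0
--         for num in nums:
--             if num%d == 0:
--                 t += 1
--         score.append(t)
--     max_score = max(score)
--     res = []
--     for i,s in enumerate(score):
--         if max_score == s:
--             res.append(divisors[i])
--     return min(res)
-- ===== SOURCE B (Python) =====
-- from typing import List
--
-- def maxDivScore(nums: List[int], divisors: List[int]) -> int:
--     # Sort the divisors ascending, then do one greedy scan keeping the first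
--     # strict maximum of the divisibility count: because the scan runs in
--     # increasing divisor order, the kept divisor is automatically the smallest
--     # among those with the maximal count, so no tie-filtering pass is needed.
--     best = None
--     for d in sorted(divisors):
--         c = 0
--         for num in nums:
--             if num % d == 0:
--                 c += 1
--         if best is None or c > best[0]:
--             best = (c, d)
--     return best[1]
-- ===== Notes on version B (the rewrite author's own statement) =====
-- stated objective: alternative
-- what changed: A builds a full score list, takes its max, filters the tied divisors and takes their min (four staged passes over parallel lists); B sorts the divisors ascending once and does a single greedy scan keeping the first strict maximum of the count, so the sorted order replaces the max/filter/min tie-breaking passes entirely.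
import Mathlib
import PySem

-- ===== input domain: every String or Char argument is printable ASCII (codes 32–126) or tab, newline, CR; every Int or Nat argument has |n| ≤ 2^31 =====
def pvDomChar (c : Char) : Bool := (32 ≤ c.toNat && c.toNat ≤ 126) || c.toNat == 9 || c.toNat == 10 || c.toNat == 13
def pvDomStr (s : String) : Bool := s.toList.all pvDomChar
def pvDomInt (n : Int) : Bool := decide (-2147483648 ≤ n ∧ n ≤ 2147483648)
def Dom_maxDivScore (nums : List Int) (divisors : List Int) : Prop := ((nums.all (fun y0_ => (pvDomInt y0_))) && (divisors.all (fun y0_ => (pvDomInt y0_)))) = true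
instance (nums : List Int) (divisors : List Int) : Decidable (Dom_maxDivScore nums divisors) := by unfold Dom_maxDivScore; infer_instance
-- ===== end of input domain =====

-- B sorts the divisors ascending and does one greedy scan keeping the first strict
-- maximum of the count, replacing A's four staged passes (score list, max, tie filter, min).

-- ===== PORT A =====
def maxDivScore (nums : List Int) (divisors : List Int) : Int :=
  let score := divisors.foldl (fun acc d =>
      acc ++ [nums.foldl (fun t num => if PySem.Int.mod num d == 0 then t + 1 else t) (0 : Int)]) []
  -- default 0 of getD is unreachable under Pre_: Python's max([]) raises ValueError
  let maxScore := (PySem.List.max? score (fun s => s)).getD 0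
  let res := (PySem.List.enumerate score).foldl
      (fun acc p => if maxScore == p.2 then acc ++ [PySem.List.pyGetD divisors p.1 0] else acc) []
  -- default 0 unreachable: maxScore is attained by some entry of score
  (PySem.List.min? res (fun x => x)).getD 0

-- ===== PORT B =====
def maxDivScore_alt (nums : List Int) (divisors : List Int) : Int :=
  let best := (PySem.List.sorted divisors (fun x => x) false).foldl
    (fun best d =>
      let c := nums.foldl (fun c num => if PySem.Int.mod num d == 0 then c + 1 else c) (0 : Int)
      match best with
      | none => some (c, d)
      | some p => if c > p.1 then some (c, d) else some p)
    (none : Option (Int × Int))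
  -- Python's best[1]: raises on best = None (empty divisors), unreachable under Pre_
  match best with
  | some p => p.2
  | none => 0

-- ===== PRECONDITION & SPEC =====
-- Pre_ excludes exactly the inputs where Python A raises: empty divisors (ValueError from
-- max([])) and a 0 divisor with nums nonempty (ZeroDivisionError from num % 0). B raises there too.
def Pre_maxDivScore (nums : List Int) (divisors : List Int) : Prop :=
  divisors ≠ [] ∧ ((0 : Int) ∈ divisors → nums = [])
instance (nums : List Int) (divisors : List Int) : Decidable (Pre_maxDivScore nums divisors) := by
  unfold Pre_maxDivScore; infer_instance

def pvWitness_maxDivScore : List Int × List Int := ([6, 3, -4], [2, 3, 4])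

def Spec_maxDivScore (nums : List Int) (divisors : List Int) (out : Int) : Prop := out = maxDivScore_alt nums divisors
instance (nums : List Int) (divisors : List Int) (out : Int) : Decidable (Spec_maxDivScore nums divisors out) := by unfold Spec_maxDivScore; infer_instance

-- ===== CLAIM (what is proved, stated in full; the proofs are below) =====
def Claim_equal_maxDivScore : Prop := ∀ (nums : List Int) (divisors : List Int), Dom_maxDivScore nums divisors → Pre_maxDivScore nums divisors → Spec_maxDivScore nums divisors (maxDivScore nums divisors)

-- ===== LEMMAS AND PROOFS =====

/-- The shared per-divisor count: how many `num ∈ nums` have `num % d == 0`. -/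
def pvCnt (nums : List Int) (d : Int) : Int :=
  (nums.countP (fun num => PySem.Int.mod num d == 0) : Int)

theorem pvInner_eq_cnt (nums : List Int) (d : Int) :
    nums.foldl (fun t num => if PySem.Int.mod num d == 0 then t + 1 else t) (0 : Int)
      = pvCnt nums d := by
  simpa [pvCnt] using
    PySem.List.foldl_if_add_one (fun num => PySem.Int.mod num d == 0) nums 0

theorem pvScore_eq_map (nums : List Int) (divisors : List Int) :
    divisors.foldl (fun acc d =>
        acc ++ [nums.foldl (fun t num => if PySem.Int.mod num d == 0 then t + 1 else t) (0 : Int)]) []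
      = divisors.map (pvCnt nums) := by
  rw [PySem.List.foldl_append_singleton_eq_map]
  simp only [List.nil_append]
  exact List.map_congr_left (fun d _ => pvInner_eq_cnt nums d)

/-- The step of B's greedy scan, with the count abbreviated. -/
def pvStep (nums : List Int) (best : Option (Int × Int)) (d : Int) : Option (Int × Int) :=
  match best with
  | none => some (pvCnt nums d, d)
  | some p => if pvCnt nums d > p.1 then some (pvCnt nums d, d) else some p

theorem pvStep_eq (nums : List Int) :
    (fun (best : Option (Int × Int)) (d : Int) =>
      let c := nums.foldl (fun c num => if PySem.Int.mod num d == 0 then c + 1 else c) (0 : Int)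
      match best with
      | none => some (c, d)
      | some p => if c > p.1 then some (c, d) else some p) = pvStep nums := by
  funext best d
  rw [show (nums.foldl (fun c num => if PySem.Int.mod num d == 0 then c + 1 else c) (0 : Int))
      = pvCnt nums d from pvInner_eq_cnt nums d]
  cases best <;> rfl

/-- Invariant of B's greedy scan over an ascending list: starting from `(c0, d0)` with
`pvCnt d0 = c0` and `d0` below every element, the result holds the maximal count, a
divisor attaining it, and that divisor is minimal among the scanned attainers. -/
theorem pvFold_inv (nums : List Int) :
    ∀ (xs : List Int), xs.Pairwise (· ≤ ·) → ∀ (c0 d0 : Int), pvCnt nums d0 = c0 →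
      (∀ y ∈ xs, d0 ≤ y) →
      ∃ c d, xs.foldl (pvStep nums) (some (c0, d0)) = some (c, d)
        ∧ (d = d0 ∨ d ∈ xs) ∧ pvCnt nums d = c ∧ c0 ≤ c
        ∧ (∀ y ∈ xs, pvCnt nums y ≤ c)
        ∧ (c = c0 → d = d0)
        ∧ (∀ y ∈ xs, pvCnt nums y = c → d ≤ y) := by
  intro xs
  induction xs with
  | nil =>
    intro _ c0 d0 hc0 _
    exact ⟨c0, d0, rfl, Or.inl rfl, hc0, le_refl _, by simp, fun _ => rfl, by simp⟩
  | cons x t ih =>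
    intro hpw c0 d0 hc0 hbelow
    have hxt : ∀ y ∈ t, x ≤ y := (List.pairwise_cons.mp hpw).1
    have htpw : t.Pairwise (· ≤ ·) := (List.pairwise_cons.mp hpw).2
    have hd0x : d0 ≤ x := hbelow x List.mem_cons_self
    by_cases hgt : pvCnt nums x > c0
    · obtain ⟨c, d, hf, hmem, hcd, hle, hall, heq, hmin⟩ :=
        ih htpw (pvCnt nums x) x rfl hxt
      refine ⟨c, d, ?_, ?_, hcd, by omega, ?_, ?_, ?_⟩
      · rw [List.foldl_cons, show pvStep nums (some (c0, d0)) x = some (pvCnt nums x, x) from by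
          simp [pvStep, hgt]]
        exact hf
      · rcases hmem with rfl | h1
        · exact Or.inr List.mem_cons_self
        · exact Or.inr (List.mem_cons_of_mem _ h1)
      · intro y hy
        rcases List.mem_cons.mp hy with rfl | hy
        · exact hle
        · exact hall y hy
      · omega
      · intro y hy hyc
        rcases List.mem_cons.mp hy with rfl | hy
        · exact (heq hyc.symm) ▸ le_refl _
        · exact hmin y hy hyc
    · obtain ⟨c, d, hf, hmem, hcd, hle, hall, heq, hmin⟩ :=
        ih htpw c0 d0 hc0 (fun y hy => le_trans hd0x (hxt y hy))
      refine ⟨c, d, ?_, ?_, hcd, hle, ?_, heq, ?_⟩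
      · rw [List.foldl_cons, show pvStep nums (some (c0, d0)) x = some (c0, d0) from by
          simp [pvStep]; omega]
        exact hf
      · rcases hmem with rfl | h1
        · exact Or.inl rfl
        · exact Or.inr (List.mem_cons_of_mem _ h1)
      · intro y hy
        rcases List.mem_cons.mp hy with rfl | hy
        · omega
        · exact hall y hy
      · intro y hy hyc
        rcases List.mem_cons.mp hy with rfl | hy
        · have hcc0 : c = c0 := by omega
          exact (heq hcc0) ▸ hd0x
        · exact hmin y hy hyc

/-- B returns a divisor with the maximal count, minimal among all attainers. -/
theorem pvB_spec (nums : List Int) (divisors : List Int) (hne : divisors ≠ []) :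
    ∃ m, maxDivScore_alt nums divisors = m ∧ m ∈ divisors
      ∧ (∀ y ∈ divisors, pvCnt nums y ≤ pvCnt nums m)
      ∧ (∀ y ∈ divisors, pvCnt nums y = pvCnt nums m → m ≤ y) := by
  rcases hs : PySem.List.sorted divisors (fun x => x) false with _ | ⟨s0, ss⟩
  · exact absurd ((PySem.List.sorted_eq_nil_iff ..).mp hs) hne
  have hpw : (s0 :: ss).Pairwise (· ≤ ·) := by
    have := PySem.List.sorted_pairwise divisors (fun x => x)
    rwa [hs] at this
  have hsmem : ∀ y, y ∈ s0 :: ss ↔ y ∈ divisors := by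
    intro y; rw [← hs]; exact PySem.List.mem_sorted ..
  obtain ⟨c, d, hf, hmem, hcd, _, hall, heq, hmin⟩ :=
    pvFold_inv nums ss (List.pairwise_cons.mp hpw).2 (pvCnt nums s0) s0 rfl
      (List.pairwise_cons.mp hpw).1
  refine ⟨d, ?_, ?_, ?_, ?_⟩
  · unfold maxDivScore_alt
    rw [pvStep_eq, hs, List.foldl_cons,
      show pvStep nums none s0 = some (pvCnt nums s0, s0) from rfl, hf]
  · rcases hmem with rfl | h1
    · exact (hsmem d).mp List.mem_cons_self
    · exact (hsmem d).mp (List.mem_cons_of_mem _ h1)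
  · intro y hy
    rcases List.mem_cons.mp ((hsmem y).mpr hy) with rfl | hy'
    · calc pvCnt nums y ≤ c := by
            rcases hmem with rfl | _
            · exact le_of_eq hcd
            · omega
        _ = pvCnt nums d := hcd.symm
    · exact hcd ▸ hall y hy'
  · intro y hy hyc
    rw [hcd] at hyc
    rcases List.mem_cons.mp ((hsmem y).mpr hy) with rfl | hy'
    · exact (heq hyc.symm) ▸ le_refl _
    · exact hmin y hy' hyc

/-- Membership in A's `res` list: exactly the divisors whose count is `M`. -/
theorem pvRes_mem (nums : List Int) (divisors : List Int) (M : Int) (x : Int) :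
    x ∈ (PySem.List.enumerate (divisors.map (pvCnt nums))).foldl
        (fun acc p => if M == p.2 then acc ++ [PySem.List.pyGetD divisors p.1 0] else acc) []
      ↔ (x ∈ divisors ∧ pvCnt nums x = M) := by
  rw [PySem.List.foldl_append_if (fun p : Int × Int => M == p.2)
      (fun p : Int × Int => PySem.List.pyGetD divisors p.1 0)]
  simp only [List.nil_append, List.mem_map, List.mem_filter,
    PySem.List.enumerate_eq_zipIdx_map, beq_iff_eq, zero_add]
  constructor
  · rintro ⟨p, ⟨⟨q, hq, rfl⟩, hMq⟩, rfl⟩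
    obtain ⟨s, i⟩ := q
    obtain ⟨-, hilt, hs⟩ := List.mem_zipIdx hq
    simp only [Nat.sub_zero] at hs
    simp only [Nat.zero_add, List.length_map] at hilt hMq hs ⊢
    have hgl : i < divisors.length := hilt
    rw [List.getElem_map] at hs
    rw [PySem.List.pyGetD_eq_getElem divisors 0 (by positivity) (by exact_mod_cast hgl)]
    simp only [Int.toNat_natCast]
    exact ⟨List.getElem_mem hgl, by omega⟩
  · rintro ⟨hx, hc⟩
    obtain ⟨i, hi, rfl⟩ := List.getElem_of_mem hx
    refine ⟨((i : Int), pvCnt nums divisors[i]), ⟨⟨(pvCnt nums divisors[i], i), ?_, by simp⟩, by simpa using hc.symm⟩, ?_⟩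
    · have : (divisors.map (pvCnt nums))[i]'(by simpa using hi) = pvCnt nums divisors[i] :=
        List.getElem_map ..
      rw [← this]
      exact List.mem_zipIdx_iff_getElem?.mpr (by simp [hi])
    · rw [PySem.List.pyGetD_eq_getElem divisors 0 (by positivity) (by simpa using hi)]
      simp

-- ===== VERDICT (by name: the statement is the Claim_ definition above) =====
theorem maxDivScore_spec : Claim_equal_maxDivScore := by
  intro nums divisors _ hpre
  unfold Spec_maxDivScore
  obtain ⟨hne, -⟩ := hpre
  obtain ⟨m, hB, hmB, hallB, hminB⟩ := pvB_spec nums divisors hne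
  rw [hB]
  simp only [maxDivScore, pvScore_eq_map]
  rcases hM : PySem.List.max? (divisors.map (pvCnt nums)) (fun s => s) with _ | M
  · exact absurd ((PySem.List.max?_eq_none_iff _ _).mp hM) (by simp [hne])
  simp only [Option.getD_some]
  have hMmem := PySem.List.max?_mem hM
  have hMmax := PySem.List.max?_isMax hM
  obtain ⟨x0, hx0, hx0M⟩ := List.mem_map.mp hMmem
  have hmM : pvCnt nums m = M := by
    have h1 : pvCnt nums m ≤ M := hMmax _ (List.mem_map_of_mem hmB)
    have h2 : M ≤ pvCnt nums m := hx0M ▸ hallB x0 hx0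
    omega
  rcases hmin : PySem.List.min? ((PySem.List.enumerate (divisors.map (pvCnt nums))).foldl
      (fun acc p => if M == p.2 then acc ++ [PySem.List.pyGetD divisors p.1 0] else acc) [])
      (fun x => x) with _ | a
  case _ =>
    exfalso
    have : m ∈ (PySem.List.enumerate (divisors.map (pvCnt nums))).foldl
        (fun acc p => if M == p.2 then acc ++ [PySem.List.pyGetD divisors p.1 0] else acc) [] :=
      (pvRes_mem nums divisors M m).mpr ⟨hmB, hmM⟩
    rw [(PySem.List.min?_eq_none_iff _ _).mp hmin] at this
    exact absurd this (List.not_mem_nil)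
  case _ =>
  show (PySem.List.min? ((PySem.List.enumerate (divisors.map (pvCnt nums))).foldl
      (fun acc p => if M == p.2 then acc ++ [PySem.List.pyGetD divisors p.1 0] else acc) [])
      (fun x => x)).getD 0 = m
  rw [hmin]
  simp only [Option.getD_some]
  have hamem := PySem.List.min?_mem hmin
  have hamin := PySem.List.min?_isMin hmin
  obtain ⟨haD, haM⟩ := (pvRes_mem nums divisors M a).mp hamem
  have h1 : a ≤ m := hamin m ((pvRes_mem nums divisors M m).mpr ⟨hmB, hmM⟩)
  have h2 : m ≤ a := hminB a haD (by omega)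
  omega
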